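-- pv_equiv track=rewrite | github.com/GeekStories/notechart | notechart/core.py | apply_hysteresis
-- ===== SOURCE A (Python) =====
-- def apply_hysteresis(pitches, stability_frames):
--     stable = []
--     current = None
--     candidate = None
--     count = 0
--     for p in pitches:
--         if p is None:
--             stable.append(None)
--             candidate = None
--             count = 0
--             continue
--         if p == candidate:
--             count += 1
--         else:
--             candidate = p
--             count = 1
--         if count >= stability_frames:
--             current = candidate
--         stable.append(current)
--     return stable
-- ===== SOURCE B (Python) =====
-- def apply_hysteresis(pitches, stability_frames):
--     # Run-based reimplementation: process maximal runs of equal values at once.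
--     t = stability_frames if stability_frames > 1 else 1
--     out = []
--     current = None
--     i, n = 0, len(pitches)
--     while i < n:
--         v = pitches[i]
--         j = i
--         while j < n and pitches[j] == v:
--             j += 1
--         L = j - i
--         if v is None:
--             out.extend([None] * L)
--         else:
--             k = min(t - 1, L)
--             out.extend([current] * k)
--             if L >= t:
--                 current = v
--                 out.extend([v] * (L - k))
--         i = j
--     return out
-- ===== Notes on version B (the rewrite author's own statement) =====
-- stated objective: alternative
-- what changed: Replaced A's per-element candidate/count state machine with run-based processing: the input is split into maximal runs of equal values, each None run emits Nones, and each non-None run of length L emits the persisted current for the first min(t-1,L) positions and the run value afterwards (updating current when L reaches the threshold t = max(stability_frames,1)).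
import Mathlib
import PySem

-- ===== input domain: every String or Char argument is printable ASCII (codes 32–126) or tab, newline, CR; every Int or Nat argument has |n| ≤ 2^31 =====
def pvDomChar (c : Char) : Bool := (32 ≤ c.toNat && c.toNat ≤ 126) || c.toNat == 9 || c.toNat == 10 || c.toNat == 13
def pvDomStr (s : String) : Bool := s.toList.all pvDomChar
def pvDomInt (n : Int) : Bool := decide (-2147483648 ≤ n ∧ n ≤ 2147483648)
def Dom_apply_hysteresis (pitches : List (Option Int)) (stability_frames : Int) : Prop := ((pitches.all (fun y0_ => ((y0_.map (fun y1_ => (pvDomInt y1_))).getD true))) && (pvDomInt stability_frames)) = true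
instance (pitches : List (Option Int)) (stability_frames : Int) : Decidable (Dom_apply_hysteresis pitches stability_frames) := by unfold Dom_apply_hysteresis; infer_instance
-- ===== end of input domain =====

-- B is a run-based reimplementation of A's per-element hysteresis state machine (objective: alternative).

-- ===== PORT A =====
-- The loop becomes structural recursion over the same state (current, candidate, count);
-- appending to `stable` becomes producing the result list front-to-back.
def aGo (sf : Int) (current candidate : Option Int) (count : Int) : List (Option Int) → List (Option Int)
  | [] => []
  | p :: rest =>
    if p = none then
      none :: aGo sf current none 0 rest
    else
      let cc := if p = candidate then (candidate, count + 1) else (p, 1)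
      let current' := if cc.2 ≥ sf then cc.1 else current
      current' :: aGo sf current' cc.1 cc.2 rest

def apply_hysteresis (pitches : List (Option Int)) (stability_frames : Int) : List (Option Int) :=
  aGo stability_frames none none 0 pitches

-- ===== PORT B =====
-- takeRun v xs = (length of the maximal prefix of xs equal to v, the rest) — the inner `while j < n` scan.
def takeRun (v : Option Int) : List (Option Int) → Nat × List (Option Int)
  | [] => (0, [])
  | x :: xs => if x = v then ((takeRun v xs).1 + 1, (takeRun v xs).2) else (0, x :: xs)

-- needed by altGo's termination proof
theorem takeRun_len (v : Option Int) : ∀ xs : List (Option Int), (takeRun v xs).2.length ≤ xs.length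
  | [] => le_refl _
  | x :: xs => by
    simp only [takeRun]
    split
    · exact le_trans (takeRun_len v xs) (Nat.le_succ _)
    · simp

def altGo (t : Int) (current : Option Int) : List (Option Int) → List (Option Int)
  | [] => []
  | v :: rest =>
    let nr := takeRun v rest
    let L : Int := (nr.1 : Int) + 1
    if v = none then
      List.replicate (nr.1 + 1) none ++ altGo t current nr.2
    else
      let k := min (t - 1) L
      if L ≥ t then
        List.replicate k.toNat current ++ (List.replicate (L - k).toNat v ++ altGo t v nr.2)
      else
        List.replicate k.toNat current ++ altGo t current nr.2
termination_by xs => xs.length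
decreasing_by all_goals simp; exact takeRun_len _ _

def apply_hysteresis_alt (pitches : List (Option Int)) (stability_frames : Int) : List (Option Int) :=
  altGo (if stability_frames > 1 then stability_frames else 1) none pitches

-- ===== PRECONDITION & SPEC =====
def Spec_apply_hysteresis (pitches : List (Option Int)) (stability_frames : Int) (out : List (Option Int)) : Prop := out = apply_hysteresis_alt pitches stability_frames
instance (pitches : List (Option Int)) (stability_frames : Int) (out : List (Option Int)) : Decidable (Spec_apply_hysteresis pitches stability_frames out) := by unfold Spec_apply_hysteresis; infer_instance

-- ===== CLAIM (what is proved, stated in full; the proofs are below) =====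
def Claim_equal_apply_hysteresis : Prop := ∀ (pitches : List (Option Int)) (stability_frames : Int), Dom_apply_hysteresis pitches stability_frames → Spec_apply_hysteresis pitches stability_frames (apply_hysteresis pitches stability_frames)

-- ===== LEMMAS AND PROOFS =====

-- After a None run, A's state is (current, none, 0) again.
theorem aGo_none_run (sf : Int) (cur : Option Int) :
    ∀ rest : List (Option Int),
      aGo sf cur none 0 rest
        = List.replicate (takeRun none rest).1 none ++ aGo sf cur none 0 (takeRun none rest).2 := by
  intro rest
  induction rest with
  | nil => simp [takeRun]
  | cons x xs ih =>
    by_cases hx : x = none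
    · subst hx
      simp [takeRun, aGo, List.replicate_succ, ih]
    · simp [takeRun, hx]

-- A step-for-step account of A inside a non-None run with candidate v and count c.
theorem aGo_run (sf : Int) (v : Int) :
    ∀ (rest : List (Option Int)) (c : Int) (cur : Option Int), (c ≥ sf → cur = some v) →
      aGo sf cur (some v) c rest
        = (List.range (takeRun (some v) rest).1).map
            (fun i : Nat => if c + (i : Int) + 1 ≥ sf then some v else cur)
          ++ aGo sf (if c + (takeRun (some v) rest).1 ≥ sf then some v else cur)
               (some v) (c + (takeRun (some v) rest).1) (takeRun (some v) rest).2 := by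
  intro rest
  induction rest with
  | nil =>
    intro c cur hcur
    by_cases h : c ≥ sf
    · simp [takeRun, aGo, h, hcur h]
    · simp [takeRun, aGo, h]
  | cons x xs ih =>
    intro c cur hcur
    by_cases hx : x = some v
    · subst hx
      have hstep : aGo sf cur (some v) c (some v :: xs)
          = (if c + 1 ≥ sf then some v else cur)
            :: aGo sf (if c + 1 ≥ sf then some v else cur) (some v) (c + 1) xs := by
        simp [aGo]
      set cur' : Option Int := if c + 1 ≥ sf then some v else cur with hcur'
      have hcur'h : c + 1 ≥ sf → cur' = some v := by intro h; simp [hcur', h]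
      rw [hstep, ih (c + 1) cur' hcur'h]
      set n' := (takeRun (some v) xs).1 with hn'
      have htr1 : (takeRun (some v) (some v :: xs)).1 = n' + 1 := by
        simp [takeRun, hn']
      have htr2 : (takeRun (some v) (some v :: xs)).2 = (takeRun (some v) xs).2 := by
        simp [takeRun]
      rw [htr1, htr2]
      rw [List.range_succ_eq_map, List.map_cons, List.map_map]
      have e0 : (if c + ((0 : Nat) : Int) + 1 ≥ sf then some v else cur) = cur' := by
        simp [hcur']
      have emap : (List.range n').map (fun i : Nat => if c + 1 + (i : Int) + 1 ≥ sf then some v else cur')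
          = (List.range n').map
              ((fun i : Nat => if c + (i : Int) + 1 ≥ sf then some v else cur) ∘ Nat.succ) := by
        apply List.map_congr_left
        intro i _
        simp only [Function.comp]
        have hcast : ((Nat.succ i : Nat) : Int) = (i : Int) + 1 := by push_cast; ring
        rw [hcast]
        by_cases h : c + 1 + (i : Int) + 1 ≥ sf
        · have h2 : c + ((i : Int) + 1) + 1 ≥ sf := by omega
          rw [if_pos h, if_pos h2]
        · have h2 : ¬ (c + ((i : Int) + 1) + 1 ≥ sf) := by omega
          have h3 : ¬ (c + 1 ≥ sf) := by omega
          rw [if_neg h, if_neg h2, hcur', if_neg h3]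
      have ecnt : c + 1 + (n' : Int) = c + ((n' + 1 : Nat) : Int) := by push_cast; ring
      have ecur : (if c + 1 + (n' : Int) ≥ sf then some v else cur')
          = (if c + ((n' + 1 : Nat) : Int) ≥ sf then some v else cur) := by
        rw [← ecnt]
        by_cases h : c + 1 + (n' : Int) ≥ sf
        · rw [if_pos h, if_pos h]
        · have h3 : ¬ (c + 1 ≥ sf) := by
            have hi : (0 : Int) ≤ (n' : Int) := Int.natCast_nonneg n'
            omega
          rw [if_neg h, if_neg h, hcur', if_neg h3]
      rw [emap, ecur, ecnt, e0]
      simp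
    · have htr : takeRun (some v) (x :: xs) = (0, x :: xs) := by simp [takeRun, hx]
      rw [htr]
      by_cases h : c ≥ sf
      · simp [h, hcur h]
      · simp [h]

-- When the next element differs from the candidate, the candidate/count state is irrelevant.
theorem aGo_reset (sf : Int) (cur cand : Option Int) (cnt : Int)
    (r : List (Option Int)) (h : ∀ y ys, r = y :: ys → y ≠ cand) :
    aGo sf cur cand cnt r = aGo sf cur none 0 r := by
  cases r with
  | nil => rfl
  | cons y ys =>
    by_cases hy : y = none
    · simp [aGo, hy]
    · have hne : y ≠ cand := h y ys rfl
      simp [aGo, hy, hne]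

theorem takeRun_head (v : Option Int) (xs : List (Option Int)) :
    ∀ y ys, (takeRun v xs).2 = y :: ys → y ≠ v := by
  induction xs with
  | nil => intro y ys h; simp [takeRun] at h
  | cons x xs ih =>
    intro y ys h
    by_cases hx : x = v
    · exact ih y ys (by simpa [takeRun, hx] using h)
    · simp [takeRun, hx] at h
      rcases h with ⟨h1, _⟩
      exact h1 ▸ hx

theorem map_threshold (T : Nat) (cur v : Option Int) :
    ∀ n : Nat, (List.range n).map (fun i => if T ≤ i then v else cur)
      = List.replicate (min T n) cur ++ List.replicate (n - min T n) v := by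
  intro n
  induction n with
  | zero => simp
  | succ n ih =>
    rw [List.range_succ, List.map_append, ih]
    by_cases hT : T ≤ n
    · have h1 : min T (n + 1) = T := by omega
      have h2 : min T n = T := by omega
      have h3 : n + 1 - T = (n - T) + 1 := by omega
      simp [hT, h1, h3, List.replicate_succ' (n := n - T)]
    · have h1 : min T (n + 1) = n + 1 := by omega
      have h2 : min T n = n := by omega
      simp [hT, h1, h2, List.replicate_succ']

theorem aGo_eq_altGo (sf t : Int) (ht : t = max sf 1) :
    ∀ (xs : List (Option Int)) (cur : Option Int),
      aGo sf cur none 0 xs = altGo t cur xs := by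
  have main : ∀ (N : Nat) (xs : List (Option Int)), xs.length ≤ N → ∀ cur,
      aGo sf cur none 0 xs = altGo t cur xs := by
    intro N
    induction N with
    | zero =>
      intro xs h cur
      have hx : xs = [] := List.length_eq_zero_iff.mp (Nat.le_zero.mp h)
      subst hx; simp [aGo, altGo]
    | succ N ihN =>
      intro xs h cur
      cases xs with
      | nil => simp [aGo, altGo]
      | cons x rest =>
        have hlen : rest.length ≤ N := by simpa using h
        by_cases hx : x = none
        · subst hx
          have h1 : aGo sf cur none 0 ((none : Option Int) :: rest)
              = none :: aGo sf cur none 0 rest := by simp [aGo]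
          rw [h1, aGo_none_run sf cur rest, ihN _ (le_trans (takeRun_len _ _) hlen) cur]
          rw [altGo]
          simp [List.replicate_succ]
        · obtain ⟨v, rfl⟩ : ∃ v, x = some v := Option.ne_none_iff_exists'.mp hx
          set n := (takeRun (some v) rest).1 with hn
          set r := (takeRun (some v) rest).2 with hr
          set cur1 : Option Int := if (1:Int) ≥ sf then some v else cur with hcur1
          have hstep : aGo sf cur none 0 (some v :: rest)
              = cur1 :: aGo sf cur1 (some v) 1 rest := by
            simp [aGo, hcur1]
          have hrun := aGo_run sf v rest 1 cur1 (by intro h'; simp [hcur1, h'])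
          rw [hstep, hrun]
          have hreset : aGo sf (if 1 + (n:Int) ≥ sf then some v else cur1) (some v) (1 + (n:Int)) r
              = aGo sf (if 1 + (n:Int) ≥ sf then some v else cur1) none 0 r :=
            aGo_reset _ _ _ _ _ (fun y ys hy => takeRun_head (some v) rest y ys (by rw [← hr]; exact hy))
          rw [← hn, ← hr, hreset, ihN r (le_trans (takeRun_len _ _) hlen) _]
          set T : Nat := (t - 1).toNat with hT
          have hTc : (T : Int) = t - 1 := by omega
          have hhead : cur1 :: (List.range n).map
                (fun i : Nat => if 1 + (i:Int) + 1 ≥ sf then some v else cur1)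
              = (List.range (n+1)).map (fun i : Nat => if T ≤ i then some v else cur) := by
            rw [List.range_succ_eq_map, List.map_cons, List.map_map]
            congr 1
            · by_cases h0 : T ≤ 0
              · have : (1:Int) ≥ sf := by omega
                simp [h0, hcur1, this]
              · have : ¬ ((1:Int) ≥ sf) := by omega
                simp [h0, hcur1, this]
            · apply List.map_congr_left
              intro i _
              simp only [Function.comp]
              have hcast : ((Nat.succ i : Nat) : Int) = (i : Int) + 1 := by push_cast; ring
              by_cases hc : 1 + (i:Int) + 1 ≥ sf
              · have h2 : T ≤ Nat.succ i := by omega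
                rw [if_pos hc, if_pos h2]
              · have h2 : ¬ (T ≤ Nat.succ i) := by omega
                have h3 : ¬ ((1:Int) ≥ sf) := by omega
                rw [if_neg hc, if_neg h2, hcur1, if_neg h3]
          rw [← List.cons_append, hhead, map_threshold]
          rw [altGo]
          simp only [← hn, ← hr]
          have hvn : (some v : Option Int) ≠ none := by simp
          rw [if_neg hvn]
          by_cases hcase : ((n:Int) + 1) ≥ t
          · have hsf : 1 + (n:Int) ≥ sf := by omega
            have hk1 : (min (t - 1) ((n:Int) + 1)).toNat = min T (n + 1) := by omega
            have hk2 : (((n:Int) + 1) - min (t - 1) ((n:Int) + 1)).toNat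
                = (n + 1) - min T (n + 1) := by omega
            rw [if_pos hcase]
            simp only [hk1, hk2, if_pos hsf]
            simp [List.append_assoc]
          · have hsf : ¬ (1 + (n:Int) ≥ sf) := by omega
            have h3 : ¬ ((1:Int) ≥ sf) := by omega
            have hk1 : (min (t - 1) ((n:Int) + 1)).toNat = min T (n + 1) := by omega
            have hk2 : (n + 1) - min T (n + 1) = 0 := by omega
            rw [if_neg hcase]
            simp only [hk1, hk2, if_neg hsf, hcur1, if_neg h3]
            simp
  intro xs cur
  exact main xs.length xs (le_refl _) cur

-- ===== VERDICT (by name: the statement is the Claim_ definition above) =====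
theorem apply_hysteresis_spec : Claim_equal_apply_hysteresis := by
  intro pitches sf _
  unfold Spec_apply_hysteresis apply_hysteresis apply_hysteresis_alt
  apply aGo_eq_altGo
  rcases lt_or_ge 1 sf with h | h
  · simp [if_pos h]; omega
  · simp [if_neg (not_lt.mpr h)]; omega
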